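-- pv_equiv track=rewrite | github.com/Azatru/python_checkIO | caps_lock.py | caps_lock
-- ===== SOURCE A (Python) =====
-- def caps_lock(text: str) -> str:
--     caps_lock = False
--     new_text = ''
--     for ch in text:
--         if ch == 'a' or ch == 'z':
--             caps_lock = not caps_lock
--             continue
--         elif caps_lock and ch.islower():
--             ch = ch.upper()
--         new_text += ch
--
--     return new_text
-- ===== SOURCE B (Python) =====
-- def caps_lock(text: str) -> str:
--     # Split the text at every 'a'/'z' marker into segments, then join them back
--     # with odd-indexed segments upper-cased (parity of the segment index = caps state).
--     segs = ['']
--     for ch in text: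
--         if ch == 'a' or ch == 'z':
--             segs.append('')
--         else:
--             segs[-1] += ch
--     return ''.join(seg if i % 2 == 0 else ''.join(c.upper() if c.islower() else c for c in seg)
--                    for i, seg in enumerate(segs))
-- ===== Notes on version B (the rewrite author's own statement) =====
-- stated objective: alternative
-- what changed: Replaces the single pass with a running caps-lock boolean by a split-at-markers / join-by-index-parity decomposition: the text is cut into segments at every 'a'/'z', and odd-indexed segments are upper-cased when joining.
import Mathlib
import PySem

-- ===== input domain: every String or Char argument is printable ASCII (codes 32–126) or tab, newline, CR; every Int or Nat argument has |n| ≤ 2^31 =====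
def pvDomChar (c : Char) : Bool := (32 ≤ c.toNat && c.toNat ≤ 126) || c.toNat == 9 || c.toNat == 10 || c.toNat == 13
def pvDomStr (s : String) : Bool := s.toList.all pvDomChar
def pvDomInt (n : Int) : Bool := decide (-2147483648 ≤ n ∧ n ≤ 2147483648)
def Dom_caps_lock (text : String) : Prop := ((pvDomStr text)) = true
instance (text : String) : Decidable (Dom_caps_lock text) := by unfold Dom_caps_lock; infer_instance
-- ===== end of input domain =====

-- B replaces A's single pass with a running caps-lock boolean by a
-- split-at-'a'/'z'-markers / join-by-segment-index-parity decomposition (alternative, same cost).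

-- ===== PORT A =====
def caps_lock (text : String) : String :=
  String.mk
    (text.toList.foldl
      (fun (st : Bool × List Char) ch =>
        if ch = 'a' ∨ ch = 'z' then (!st.1, st.2)
        else (st.1, st.2 ++ [if st.1 && PySem.Chars.islower ch then PySem.Chars.upperChar ch else ch]))
      (false, [])).2

-- ===== PORT B =====
-- segs[-1] += ch
def pvAppendLast : List (List Char) → Char → List (List Char)
  | [], c => [[c]]
  | [s], c => [s ++ [c]]
  | s :: rest, c => s :: pvAppendLast rest c

-- phase 1 of Source B: cut the text into segments at every 'a'/'z'
def pvSegs (l : List Char) : List (List Char) :=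
  l.foldl (fun segs ch => if ch = 'a' ∨ ch = 'z' then segs ++ [[]] else pvAppendLast segs ch) [[]]

-- ''.join(c.upper() if c.islower() else c for c in seg)
def pvUpSeg (s : List Char) : List Char :=
  s.map (fun c => if PySem.Chars.islower c then PySem.Chars.upperChar c else c)

def caps_lock_alt (text : String) : String :=
  String.mk (PySem.Chars.join []
    ((PySem.List.enumerate (pvSegs text.toList) 0).map
      (fun p => if PySem.Int.mod p.1 2 == 0 then p.2 else pvUpSeg p.2)))

-- ===== PRECONDITION & SPEC =====
def Spec_caps_lock (text : String) (out : String) : Prop := out = caps_lock_alt text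
instance (text : String) (out : String) : Decidable (Spec_caps_lock text out) := by unfold Spec_caps_lock; infer_instance

-- ===== CLAIM (what is proved, stated in full; the proofs are below) =====
def Claim_equal_caps_lock : Prop := ∀ (text : String), Dom_caps_lock text → Spec_caps_lock text (caps_lock text)

-- ===== LEMMAS AND PROOFS =====

-- common recursive specification: A's loop, written structurally
def pvGo (b : Bool) : List Char → List Char
  | [] => []
  | c :: cs =>
      if c = 'a' ∨ c = 'z' then pvGo (!b) cs
      else (if b && PySem.Chars.islower c then PySem.Chars.upperChar c else c) :: pvGo b cs

theorem pvFoldA (l : List Char) (b : Bool) (acc : List Char) :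
    (l.foldl
      (fun (st : Bool × List Char) ch =>
        if ch = 'a' ∨ ch = 'z' then (!st.1, st.2)
        else (st.1, st.2 ++ [if st.1 && PySem.Chars.islower ch then PySem.Chars.upperChar ch else ch]))
      (b, acc)).2 = acc ++ pvGo b l := by
  induction l generalizing b acc with
  | nil => simp [pvGo]
  | cons c cs ih =>
      simp only [List.foldl_cons]
      by_cases h : c = 'a' ∨ c = 'z'
      · simp only [if_pos h, pvGo, ih]
      · simp only [if_neg h, pvGo, ih]
        simp

-- join with an alternating parity flag (first segment transformed iff b)
def pvJoinP (b : Bool) : List (List Char) → List Char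
  | [] => []
  | s :: rest => (if b then pvUpSeg s else s) ++ pvJoinP (!b) rest

theorem pvJoinP_append_single (segs : List (List Char)) (b : Bool) (t : List Char) :
    pvJoinP b (segs ++ [t]) =
      pvJoinP b segs ++ (if xor b (decide (segs.length % 2 = 1)) then pvUpSeg t else t) := by
  induction segs generalizing b with
  | nil => simp [pvJoinP]
  | cons s rest ih =>
      simp only [List.cons_append, pvJoinP, ih, List.length_cons, List.append_assoc]
      congr 2
      rcases b with _ | _ <;> simp <;> split_ifs <;> first | rfl | omega

theorem pvAppendLast_joinP (segs : List (List Char)) (b : Bool) (c : Char) (h : segs ≠ []) :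
    pvJoinP b (pvAppendLast segs c) =
      pvJoinP b segs ++
        [if xor b (decide ((segs.length - 1) % 2 = 1)) then
            (if PySem.Chars.islower c then PySem.Chars.upperChar c else c) else c] := by
  induction segs generalizing b with
  | nil => exact absurd rfl h
  | cons s rest ih =>
      cases rest with
      | nil => rcases b with _ | _ <;> simp [pvAppendLast, pvJoinP, pvUpSeg]
      | cons t rest' =>
          have hne : (t :: rest') ≠ ([] : List (List Char)) := by simp
          simp only [pvAppendLast, pvJoinP, ih (!b) hne, List.length_cons, List.append_assoc]
          congr 3
          rcases b with _ | _ <;> simp <;> split_ifs <;> first | rfl | omega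

theorem pvAppendLast_length (segs : List (List Char)) (c : Char) (h : segs ≠ []) :
    (pvAppendLast segs c).length = segs.length := by
  induction segs with
  | nil => exact absurd rfl h
  | cons s rest ih =>
      cases rest with
      | nil => simp [pvAppendLast]
      | cons t rest' => simpa [pvAppendLast] using ih (by simp)

theorem pvFoldB (l : List Char) (segs : List (List Char)) (b : Bool) (h : segs ≠ []) :
    pvJoinP b
        (l.foldl
          (fun segs ch => if ch = 'a' ∨ ch = 'z' then segs ++ [[]] else pvAppendLast segs ch)
          segs) =
      pvJoinP b segs ++ pvGo (xor b (decide ((segs.length - 1) % 2 = 1))) l := by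
  induction l generalizing segs b with
  | nil => simp [pvGo]
  | cons c cs ih =>
      have hlen : 1 ≤ segs.length := by
        cases segs with
        | nil => exact absurd rfl h
        | cons _ _ => simp
      by_cases hc : c = 'a' ∨ c = 'z'
      · simp only [List.foldl_cons, pvGo]
        rw [if_pos hc, if_pos hc, ih (segs ++ [[]]) b (by simp)]
        rw [pvJoinP_append_single]
        have hpar : xor b (decide ((segs.length + 1 - 1) % 2 = 1)) =
            !(xor b (decide ((segs.length - 1) % 2 = 1))) := by
          have hd : decide (segs.length % 2 = 1) = !decide ((segs.length - 1) % 2 = 1) := by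
            rw [← decide_not, decide_eq_decide]
            omega
          rcases b with _ | _ <;> simp [hd]
        simp only [List.length_append, List.length_cons, List.length_nil, zero_add, hpar]
        rcases hb : xor b (decide (segs.length % 2 = 1)) <;> simp_all [pvUpSeg]
      · simp only [List.foldl_cons, if_neg hc]
        rw [ih (pvAppendLast segs c) b (by
          cases segs with
          | nil => exact absurd rfl h
          | cons s rest => cases rest <;> simp [pvAppendLast])]
        rw [pvAppendLast_joinP segs b c h, pvAppendLast_length segs c h]
        simp only [pvGo, if_neg hc, List.append_assoc, List.singleton_append]
        congr 2
        rcases hb : xor b (decide ((segs.length - 1) % 2 = 1)) <;>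
          rcases hl : PySem.Chars.islower c <;> simp

theorem pvJoin_cons (x : List Char) (xs : List (List Char)) :
    PySem.Chars.join [] (x :: xs) = x ++ PySem.Chars.join [] xs := by
  cases xs <;> simp [PySem.Chars.join, List.intercalate]

theorem pvEnum_joinP (segs : List (List Char)) (n : Int) (hn : 0 ≤ n) :
    PySem.Chars.join []
        ((PySem.List.enumerate segs n).map
          (fun p => if PySem.Int.mod p.1 2 == 0 then p.2 else pvUpSeg p.2)) =
      pvJoinP (decide (n % 2 = 1)) segs := by
  induction segs generalizing n with
  | nil => simp [PySem.List.enumerate_nil, pvJoinP, PySem.Chars.join, List.intercalate]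
  | cons s rest ih =>
      rw [PySem.List.enumerate_cons, List.map_cons, pvJoin_cons, ih (n + 1) (by omega)]
      have hmod : PySem.Int.mod n 2 = n % 2 := by
        simp [PySem.Int.mod, Int.fmod_eq_emod_of_nonneg]
      have hpar : (decide ((n + 1) % 2 = 1)) = !(decide (n % 2 = 1)) := by
        rw [Bool.eq_not_iff, ne_eq, decide_eq_decide]; omega
      rw [hpar]
      simp only [pvJoinP, hmod]
      congr 1
      rcases hb : decide (n % 2 = 1) <;> simp_all

-- ===== VERDICT (by name: the statement is the Claim_ definition above) =====
theorem caps_lock_spec : Claim_equal_caps_lock := by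
  intro text _
  unfold Spec_caps_lock caps_lock caps_lock_alt pvSegs
  rw [pvEnum_joinP _ 0 (by norm_num)]
  rw [pvFoldB _ [[]] _ (by simp)]
  rw [pvFoldA]
  simp [pvJoinP]
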